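-- pv_equiv track=rewrite | github.com/millerk22/brexit-tie-decay | code/visulization_of_ground_truth.py | return_input
-- ===== SOURCE A (Python) =====
-- def return_input(mdict, node_value,idmap):
--     keys=list(mdict.keys())
--     values=[]
--     for x in keys:
--         try:
--             values.append(node_value[idmap[str(x)]])
--         except:
--             values.append(2)
--     mydict=dict(zip(keys,values))
--     n={key:val for key, val in mydict.items() if val == 2}
--     l={key:val for key, val in mydict.items() if val == 0}
--     r={key:val for key, val in mydict.items() if val == 1}
--
--     return len(list(n.keys())),len(list(l.keys())),len(list(r.keys()))
-- ===== SOURCE B (Python) =====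
-- def return_input(mdict, node_value, idmap):
--     # Single pass with three counters instead of values list + zip/dict + three comprehensions.
--     c2 = 0
--     c0 = 0
--     c1 = 0
--     for x in mdict:
--         try:
--             val = node_value[idmap[str(x)]]
--         except KeyError:
--             val = 2
--         if val == 2:
--             c2 += 1
--         elif val == 0:
--             c0 += 1
--         elif val == 1:
--             c1 += 1
--     return c2, c0, c1
-- ===== Notes on version B (the rewrite author's own statement) =====
-- stated objective: simpler
-- what changed: B replaces A's intermediate values list, the zip/dict reconstruction and the three filtering dict comprehensions (four passes over the data) by one accumulating loop over the keys that increments three counters.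
import Mathlib
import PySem

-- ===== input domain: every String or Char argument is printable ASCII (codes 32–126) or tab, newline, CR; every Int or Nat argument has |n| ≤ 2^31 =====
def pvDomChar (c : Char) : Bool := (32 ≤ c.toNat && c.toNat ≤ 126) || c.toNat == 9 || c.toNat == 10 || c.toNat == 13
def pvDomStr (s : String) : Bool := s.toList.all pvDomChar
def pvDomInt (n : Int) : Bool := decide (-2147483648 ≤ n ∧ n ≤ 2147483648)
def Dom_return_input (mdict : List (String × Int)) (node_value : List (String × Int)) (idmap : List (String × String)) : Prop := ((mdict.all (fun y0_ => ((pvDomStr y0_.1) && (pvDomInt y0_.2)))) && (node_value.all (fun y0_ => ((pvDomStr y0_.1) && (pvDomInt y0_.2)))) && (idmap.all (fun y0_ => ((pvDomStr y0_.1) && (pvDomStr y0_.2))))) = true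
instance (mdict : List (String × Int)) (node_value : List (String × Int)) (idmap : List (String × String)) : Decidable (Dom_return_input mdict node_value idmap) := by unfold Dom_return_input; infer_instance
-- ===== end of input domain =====

-- B replaces A's values list, zip/dict reconstruction and three filtering comprehensions by one counting pass (simpler; return value only).


-- ===== PORT A =====
-- Literal port of A: build the values list over the keys (try/except → match on the two
-- dict lookups, bare except defaults to 2), rebuild dict(zip(keys, values)), take the three
-- filtering comprehensions and return the lengths of their key lists.
def return_input (mdict : List (String × Int)) (node_value : List (String × Int)) (idmap : List (String × String)) : Int × Int × Int :=
  let md := PySem.Dict.ofList mdict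
  let nvd := PySem.Dict.ofList node_value
  let imd := PySem.Dict.ofList idmap
  let keys := md.keys
  let values := keys.map (fun x =>
    match imd.get? x with
    | some y =>
      match nvd.get? y with
      | some v => v
      | none => (2 : Int)
    | none => (2 : Int))
  let mydict := PySem.Dict.ofList (keys.zip values)
  let n := mydict.items.filter (fun p => p.2 == 2)
  let l := mydict.items.filter (fun p => p.2 == 0)
  let r := mydict.items.filter (fun p => p.2 == 1)
  (((n.map Prod.fst).length : Int), ((l.map Prod.fst).length : Int), ((r.map Prod.fst).length : Int))

-- ===== PORT B =====
-- Literal port of B: one fold over the keys with three counters (c2, c0, c1).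
def return_input_alt (mdict : List (String × Int)) (node_value : List (String × Int)) (idmap : List (String × String)) : Int × Int × Int :=
  let nvd := PySem.Dict.ofList node_value
  let imd := PySem.Dict.ofList idmap
  (PySem.Dict.ofList mdict).keys.foldl
    (fun (c : Int × Int × Int) x =>
      let val : Int :=
        match imd.get? x with
        | some y =>
          match nvd.get? y with
          | some v => v
          | none => (2 : Int)
        | none => (2 : Int)
      if val = 2 then (c.1 + 1, c.2.1, c.2.2)
      else if val = 0 then (c.1, c.2.1 + 1, c.2.2)
      else if val = 1 then (c.1, c.2.1, c.2.2 + 1)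
      else c)
    (0, 0, 0)

-- ===== PRECONDITION & SPEC =====
def Spec_return_input (mdict : List (String × Int)) (node_value : List (String × Int)) (idmap : List (String × String)) (out : Int × Int × Int) : Prop := out = return_input_alt mdict node_value idmap
instance (mdict : List (String × Int)) (node_value : List (String × Int)) (idmap : List (String × String)) (out : Int × Int × Int) : Decidable (Spec_return_input mdict node_value idmap out) := by unfold Spec_return_input; infer_instance

-- ===== CLAIM (what is proved, stated in full; the proofs are below) =====
def Claim_equal_return_input : Prop := ∀ (mdict : List (String × Int)) (node_value : List (String × Int)) (idmap : List (String × String)), Dom_return_input mdict node_value idmap → Spec_return_input mdict node_value idmap (return_input mdict node_value idmap)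

-- ===== LEMMAS AND PROOFS =====

-- B's fold accumulates exactly the three filter counts of the mapped values.
theorem pv_foldl_count (f : String → Int) (l : List String) (c : Int × Int × Int) :
    l.foldl
      (fun (c : Int × Int × Int) x =>
        let val : Int := f x
        if val = 2 then (c.1 + 1, c.2.1, c.2.2)
        else if val = 0 then (c.1, c.2.1 + 1, c.2.2)
        else if val = 1 then (c.1, c.2.1, c.2.2 + 1)
        else c) c
    = (c.1 + ((l.filter (fun x => f x == 2)).length : Int),
       c.2.1 + ((l.filter (fun x => f x == 0)).length : Int),
       c.2.2 + ((l.filter (fun x => f x == 1)).length : Int)) := by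
  induction l generalizing c with
  | nil => simp
  | cons a t ih =>
    simp only [List.foldl_cons, List.filter_cons]
    by_cases h2 : f a = 2
    · simp [h2, ih]; ring
    · by_cases h0 : f a = 0
      · simp [h0, ih]; ring
      · by_cases h1 : f a = 1
        · simp [h1, ih]; ring
        · simp [h2, h0, h1, ih]

-- The rebuilt dict's items are exactly keys paired with values, because keys is Nodup.
theorem pv_ofList_items {ν : Type} (l : List (String × ν)) (h : (l.map Prod.fst).Nodup) :
    (PySem.Dict.ofList l).items = l := by
  have := PySem.Dict.items_foldl_insert_fresh l Prod.fst Prod.snd PySem.Dict.empty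
    (by intro a _; simp [PySem.Dict.contains_empty]) h
  simpa [PySem.Dict.ofList, PySem.Dict.update] using this

-- A's four-pass computation over a Nodup key list equals B's counting fold, for any value function f.
theorem pv_main (f : String → Int) (ks : List String) (hnd : ks.Nodup) :
    (((((PySem.Dict.ofList (ks.zip (ks.map f))).items.filter (fun p => p.2 == 2)).map Prod.fst).length : Int),
     ((((PySem.Dict.ofList (ks.zip (ks.map f))).items.filter (fun p => p.2 == 0)).map Prod.fst).length : Int),
     ((((PySem.Dict.ofList (ks.zip (ks.map f))).items.filter (fun p => p.2 == 1)).map Prod.fst).length : Int))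
    = ks.foldl
        (fun (c : Int × Int × Int) x =>
          let val : Int := f x
          if val = 2 then (c.1 + 1, c.2.1, c.2.2)
          else if val = 0 then (c.1, c.2.1 + 1, c.2.2)
          else if val = 1 then (c.1, c.2.1, c.2.2 + 1)
          else c)
        (0, 0, 0) := by
  have hzip : ∀ t : List String, t.zip (t.map f) = t.map (fun x => (x, f x)) := by
    intro t
    induction t with
    | nil => simp
    | cons a t ih => simpa using ih
  have hitems : (PySem.Dict.ofList (ks.zip (ks.map f))).items = ks.map (fun x => (x, f x)) := by
    rw [hzip ks]
    apply pv_ofList_items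
    simpa [Function.comp_def] using hnd
  rw [pv_foldl_count f ks (0, 0, 0), hitems]
  simp [List.filter_map, Function.comp_def]

-- ===== VERDICT (by name: the statement is the Claim_ definition above) =====
theorem return_input_spec : Claim_equal_return_input := by
  intro mdict node_value idmap _
  unfold Spec_return_input return_input return_input_alt
  exact pv_main
    (fun x =>
      match (PySem.Dict.ofList idmap).get? x with
      | some y =>
        match (PySem.Dict.ofList node_value).get? y with
        | some v => v
        | none => (2 : Int)
      | none => (2 : Int))
    (PySem.Dict.ofList mdict).keys
    (PySem.Dict.nodup_keys_ofList mdict)
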